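-- pv_equiv track=rewrite | github.com/aswindle/PiMusic | cake_like.py | answer
-- ===== SOURCE A (Python) =====
-- def answer(s):
--     # Worst-case: entire string is the pattern, meaning only 1 copy
--     result = 1
--     for i in range(1, len(s)+1):
--         # If s isn't a multiple of i, there can't be i copies of a pattern
--         if len(s)%i != 0:
--             continue
--         else:
--             # pattern is the first 1/ith of s
--             # if i copies of pattern equal s, then we've found a new highest number
--             pattern = s[0:(len(s)//i)]
--             if (pattern*i == s):
--                 result = i
--     return result
-- ===== SOURCE B (Python) =====
-- def answer(s):
--     # Smallest period p of s is the first index >= 1 where s occurs in s + s;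
--     # p always divides len(s), so the maximal number of copies is len(s) // p.
--     if not s:
--         return 1
--     return len(s) // (s + s).find(s, 1)
-- ===== Notes on version B (the rewrite author's own statement) =====
-- stated objective: faster
-- what changed: Replaces the divisor-by-divisor tiling comparison with the smallest-period trick: the first index >= 1 at which s occurs in s+s is the smallest period p of s, p always divides len(s), and the answer is len(s)//p.
import Mathlib
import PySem

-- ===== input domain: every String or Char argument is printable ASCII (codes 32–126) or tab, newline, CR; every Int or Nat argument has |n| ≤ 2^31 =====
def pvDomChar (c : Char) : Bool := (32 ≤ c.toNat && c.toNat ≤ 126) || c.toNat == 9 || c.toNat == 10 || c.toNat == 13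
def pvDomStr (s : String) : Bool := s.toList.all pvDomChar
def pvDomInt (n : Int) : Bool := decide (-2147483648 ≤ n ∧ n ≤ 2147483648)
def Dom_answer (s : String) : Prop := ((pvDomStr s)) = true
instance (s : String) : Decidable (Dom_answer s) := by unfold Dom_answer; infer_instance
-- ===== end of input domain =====

-- B replaces A's per-divisor tiling comparisons with the smallest-period trick
-- (first occurrence of s in s+s at index ≥ 1), an O(n) algorithm; equivalence is proved for all strings.


-- ===== PORT A =====
def answer (s : String) : Int :=
  let l := s.toList
  let n : Int := PySem.Chars.len l
  (PySem.List.pyRange 1 (n + 1) 1).foldl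
    (fun result i =>
      if PySem.Int.mod n i ≠ 0 then
        result
      else
        let pattern := PySem.Chars.slice l (some 0) (some (PySem.Int.floordiv n i))
        if PySem.List.pyRepeat pattern i = l then i else result)
    1

-- ===== PORT B =====
def answer_alt (s : String) : Int :=
  let l := s.toList
  if l.isEmpty then 1
  else PySem.Int.floordiv (PySem.Chars.len l) (PySem.Chars.findFrom (l ++ l) l 1 none)

-- ===== PRECONDITION & SPEC =====
def Spec_answer (s : String) (out : Int) : Prop := out = answer_alt s
instance (s : String) (out : Int) : Decidable (Spec_answer s out) := by unfold Spec_answer; infer_instance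

-- ===== CLAIM (what is proved, stated in full; the proofs are below) =====
def Claim_equal_answer : Prop := ∀ (s : String), Dom_answer s → Spec_answer s (answer s)

-- ===== LEMMAS AND PROOFS =====

-- The test performed by A's loop body at index i (divisibility plus the tiling check).
def pvQ (l : List Char) (n i : Int) : Bool :=
  decide (PySem.Int.mod n i = 0) &&
    decide (PySem.List.pyRepeat (PySem.Chars.slice l (some 0) (some (PySem.Int.floordiv n i))) i = l)

lemma pv_body_eq (l : List Char) (n : Int) :
    (fun (result i : Int) =>
      if PySem.Int.mod n i ≠ 0 then
        result
      else
        if PySem.List.pyRepeat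
            (PySem.Chars.slice l (some 0) (some (PySem.Int.floordiv n i))) i = l then i
        else result)
    = fun (r i : Int) => if pvQ l n i then i else r := by
  funext r i
  by_cases h1 : PySem.Int.mod n i = 0 <;> by_cases h2 :
      PySem.List.pyRepeat (PySem.Chars.slice l (some 0) (some (PySem.Int.floordiv n i))) i = l <;>
    simp [pvQ, h1]

lemma pv_foldl_nomatch {P : Int → Bool} (xs : List Int) (a : Int)
    (h : ∀ x ∈ xs, ¬ P x = true) :
    xs.foldl (fun r i => if P i then i else r) a = a := by
  induction xs generalizing a with
  | nil => rfl
  | cons x t ih =>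
      simp only [List.foldl_cons]
      rw [if_neg (h x (by simp))]
      exact ih a (fun y hy => h y (by simp [hy]))

lemma pv_foldl_lastMatch {P : Int → Bool} (xs : List Int) (a m : Int)
    (hsort : xs.Pairwise (· < ·)) (hm : m ∈ xs) (hPm : P m = true)
    (hmax : ∀ x ∈ xs, P x = true → x ≤ m) :
    xs.foldl (fun r i => if P i then i else r) a = m := by
  induction xs generalizing a with
  | nil => cases hm
  | cons x t ih =>
      simp only [List.foldl_cons]
      rcases List.mem_cons.mp hm with rfl | hmt
      · rw [if_pos hPm]
        exact pv_foldl_nomatch t m (fun y hy hPy => by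
          have h1 : m < y := (List.pairwise_cons.mp hsort).1 y hy
          have h2 : y ≤ m := hmax y (by simp [hy]) hPy
          omega)
      · exact ih _ (List.pairwise_cons.mp hsort).2 hmt
          (fun y hy hPy => hmax y (by simp [hy]) hPy)

-- rotation is closed under multiples
lemma pv_rot_mul {l : List Char} {p : Nat} (h : l.rotate p = l) (m : Nat) :
    l.rotate (p * m) = l := by
  induction m with
  | zero => simp
  | succ m ih => rw [Nat.mul_succ, ← List.rotate_rotate, ih, h]

-- a minimal positive fixed rotation divides every fixed rotation
lemma pv_min_rot_dvd {l : List Char} {p : Nat} (hp : 0 < p) (hrot : l.rotate p = l)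
    (hmin : ∀ k, 1 ≤ k → k < p → l.rotate k ≠ l) {j : Nat} (hj : l.rotate j = l) : p ∣ j := by
  have hr : l.rotate (j % p) = l := by
    rw [← Nat.div_add_mod j p] at hj
    rwa [← List.rotate_rotate, pv_rot_mul hrot] at hj
  rcases Nat.eq_zero_or_pos (j % p) with h0 | h1
  · exact Nat.dvd_of_mod_eq_zero h0
  · exact absurd hr (hmin _ h1 (Nat.mod_lt _ hp))

-- a fixed rotation by p (p ∣ length) tiles the list with its first p elements
lemma pv_tile_of_rot : ∀ (k : Nat) (l : List Char) (p : Nat), 0 < p → l.length = k * p →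
    l.rotate p = l → (List.replicate k (l.take p)).flatten = l := by
  intro k
  induction k with
  | zero =>
      intro l p _ hl _
      simp at hl ⊢
      simp [hl]
  | succ k ih =>
      intro l p hp hl hrot
      have hpn : p ≤ l.length := by simp [hl, Nat.succ_mul]
      have hd : l.drop p ++ l.take p = l := by
        rw [← List.rotate_eq_drop_append_take hpn]; exact hrot
      rcases Nat.eq_zero_or_pos k with rfl | hk
      · have : l.take p = l := List.take_of_length_le (by omega)
        simp [this]
      · have hlen' : (l.drop p).length = k * p := by
          simp [hl, Nat.succ_mul]
        have hple : p ≤ (l.drop p).length := by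
          rw [hlen']; exact Nat.le_mul_of_pos_left p hk
        have htake : l.take p = (l.drop p).take p := by
          conv_lhs => rw [← hd]
          rw [List.take_append_of_le_length hple]
        have hrot' : (l.drop p).rotate p = l.drop p := by
          rw [List.rotate_eq_drop_append_take hple, ← htake]
          conv_rhs => rw [← hd]
          rw [List.drop_append_of_le_length hple]
        have hflat : (List.replicate k (l.take p)).flatten = l.drop p := by
          rw [htake]; exact ih (l.drop p) p hp hlen' hrot'
        rw [List.replicate_succ, List.flatten_cons, hflat, List.take_append_drop]

-- conversely, a tiling by the first p elements fixes the rotation by p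
lemma pv_rot_of_tile {l : List Char} {k p : Nat} (_hp : 0 < p) (hk : 0 < k)
    (hl : l.length = k * p) (h : (List.replicate k (l.take p)).flatten = l) :
    l.rotate p = l := by
  obtain ⟨k', rfl⟩ : ∃ k', k = k' + 1 := ⟨k - 1, by omega⟩
  have hpn : p ≤ l.length := by rw [hl]; exact Nat.le_mul_of_pos_left p hk
  have htl : (l.take p).length = p := by rw [List.length_take]; omega
  have hsplit : l = l.take p ++ (List.replicate k' (l.take p)).flatten := by
    conv_lhs => rw [← h]
    rw [List.replicate_succ, List.flatten_cons]
  have hdrop : l.drop p = (List.replicate k' (l.take p)).flatten := by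
    conv_lhs => rw [hsplit]
    exact List.drop_left' htl
  rw [List.rotate_eq_drop_append_take hpn, hdrop]
  calc (List.replicate k' (l.take p)).flatten ++ l.take p
      = (List.replicate k' (l.take p) ++ [l.take p]).flatten := by
        rw [List.flatten_append]; simp
    _ = (List.replicate (k' + 1) (l.take p)).flatten := by
        rw [← List.replicate_succ']
    _ = l := h

-- occurrence of l at offset k (1 ≤ k ≤ |l|) inside l ++ l is exactly a fixed rotation by k
lemma pv_prefix_iff_rot {l : List Char} {k : Nat} (hk : k ≤ l.length) :
    l <+: (l ++ l).drop k ↔ l.rotate k = l := by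
  rw [List.drop_append_of_le_length hk, List.rotate_eq_drop_append_take hk]
  have key : (l.drop k ++ l).take l.length = l.drop k ++ l.take k := by
    rw [List.take_append]
    have h1 : (l.drop k).take l.length = l.drop k :=
      List.take_of_length_le (by simp)
    rw [h1]
    congr 1
    simp only [List.length_drop]
    rw [show l.length - (l.length - k) = k by omega]
  constructor
  · intro h
    have h2 := List.prefix_iff_eq_take.mp h
    rw [key] at h2
    exact h2.symm
  · intro h
    rw [List.prefix_iff_eq_take, key]
    exact h.symm

-- A's test at a positive integer index, in Nat terms
lemma pv_Q_iff (l : List Char) (j : Nat) :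
    pvQ l (l.length : Int) (j : Int) = true ↔
      j ∣ l.length ∧ (List.replicate j (l.take (l.length / j))).flatten = l := by
  have hs : PySem.Chars.slice l (some 0) (some ((l.length / j : Nat) : Int))
      = List.take (l.length / j) l := by
    simp only [PySem.Chars.slice_eq_listSlice, PySem.List.slice_zero_start]
    exact PySem.List.slice_to_natCast l (l.length / j)
  unfold pvQ
  rw [Bool.and_eq_true, decide_eq_true_eq, decide_eq_true_eq,
    PySem.Int.mod_eq_zero_iff_dvd, Int.natCast_dvd_natCast, PySem.Int.floordiv_natCast, hs]
  simp only [PySem.List.pyRepeat, Int.toNat_natCast]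

-- the two ports agree
lemma pv_main (s : String) : answer s = answer_alt s := by
  simp only [answer, answer_alt]
  rw [pv_body_eq s.toList (PySem.Chars.len s.toList)]
  set l := s.toList with hldef
  have hlen : PySem.Chars.len l = (l.length : Int) := PySem.Chars.len_eq l
  rcases Nat.eq_zero_or_pos l.length with hn0 | hn
  · have hnil : l = [] := List.eq_nil_of_length_eq_zero hn0
    simp [hnil]
  · have hemp : l.isEmpty = false := by
      rcases l with _ | ⟨c, t⟩
      · simp at hn
      · rfl
    have h1len : (1 : Nat) ≤ (l ++ l).length := by simp; omega
    -- first occurrence of l in l ++ l at an index ≥ 1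
    have hocc : l <:+: (l ++ l).drop 1 := by
      have hsuf : l <:+ (l ++ l).drop 1 := by
        rw [List.drop_append_of_le_length (by omega)]
        exact List.suffix_append _ _
      exact hsuf.isInfix
    have hne : PySem.Chars.findFrom (l ++ l) l ((1 : Nat) : Int) none ≠ -1 := by
      rw [Ne, PySem.Chars.findFrom_natCast_eq_neg_one_iff _ _ 1 h1len]
      exact not_not_intro hocc
    obtain ⟨hr1, hrpre, hrmin⟩ := PySem.Chars.findFrom_natCast_spec (l ++ l) l 1 h1len hne
    simp only [Nat.cast_one] at hr1 hrpre hrmin hne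
    set r := PySem.Chars.findFrom (l ++ l) l 1 none with hrdef
    set p := r.toNat with hpdef
    have hp0 : 0 < p := by omega
    have hrp : r = (p : Int) := by omega
    -- the found period is at most |l|
    have hple : p ≤ l.length := by
      by_contra hgt
      exact hrmin l.length (by omega) (by omega)
        (by rw [List.drop_left])
    have hrotp : l.rotate p = l := (pv_prefix_iff_rot hple).mp hrpre
    have hminrot : ∀ k, 1 ≤ k → k < p → l.rotate k ≠ l := by
      intro k h1k hkp hRk
      exact hrmin k h1k hkp ((pv_prefix_iff_rot (by omega)).mpr hRk)
    have hpn : p ∣ l.length :=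
      pv_min_rot_dvd hp0 hrotp hminrot (List.rotate_length l)
    set m := l.length / p with hmdef
    have hm1 : 1 ≤ m := (Nat.one_le_div_iff hp0).mpr hple
    have hmn : m ≤ l.length := Nat.div_le_self _ _
    have hmd : m ∣ l.length := Nat.div_dvd_of_dvd hpn
    have hmp : l.length / m = p := Nat.div_div_self hpn (by omega)
    have hQm : pvQ l (PySem.Chars.len l) (m : Int) = true := by
      rw [hlen, pv_Q_iff]
      refine ⟨hmd, ?_⟩
      rw [hmp]
      exact pv_tile_of_rot m l p hp0 (Nat.div_mul_cancel hpn).symm hrotp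
    have hmem : (m : Int) ∈ PySem.List.pyRange 1 (PySem.Chars.len l + 1) 1 := by
      rw [hlen, PySem.List.mem_pyRange_one]
      refine ⟨by omega, by omega⟩
    have hmax : ∀ x ∈ PySem.List.pyRange 1 (PySem.Chars.len l + 1) 1,
        pvQ l (PySem.Chars.len l) x = true → x ≤ (m : Int) := by
      intro x hx hQx
      rw [hlen] at hx hQx
      rw [PySem.List.mem_pyRange_one] at hx
      obtain ⟨hx1, hx2⟩ := hx
      have hxj : x = (x.toNat : Int) := by omega
      set j := x.toNat with hjdef
      have hj0 : 0 < j := by omega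
      have hjle : j ≤ l.length := by omega
      rw [hxj, pv_Q_iff] at hQx
      obtain ⟨hjd, htile⟩ := hQx
      have hjq : 0 < l.length / j := (Nat.one_le_div_iff hj0).mpr hjle
      have hrotj : l.rotate (l.length / j) = l :=
        pv_rot_of_tile hjq hj0 (Nat.mul_div_cancel' hjd).symm htile
      have hd2 : p ∣ l.length / j := pv_min_rot_dvd hp0 hrotp hminrot hrotj
      have hple2 : p ≤ l.length / j := Nat.le_of_dvd hjq hd2
      have hjm : j ≤ m := by
        calc j = l.length / (l.length / j) := (Nat.div_div_self hjd (by omega)).symm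
          _ ≤ l.length / p := Nat.div_le_div_left hple2 hp0
      omega
    rw [pv_foldl_lastMatch _ 1 (m : Int)
        (PySem.List.pairwise_lt_pyRange_one 1 (PySem.Chars.len l + 1)) hmem hQm hmax,
      hemp]
    simp only [Bool.false_eq_true, if_false, hlen, hrp, PySem.Int.floordiv_natCast]
    rw [hmdef]

-- ===== VERDICT (by name: the statement is the Claim_ definition above) =====
theorem answer_spec : Claim_equal_answer := by
  intro s _
  unfold Spec_answer
  exact pv_main s
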